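-- pv_equiv track=rewrite | github.com/kkitsios/Complex-Data-Projects | assignment1/src/assignment1.py | equidepth_histogram
-- ===== SOURCE A (Python) =====
-- def equidepth_histogram(data, bins):
--     sorted_data = sorted(data)
--     n = len(data)
--     bin_size = n // bins
--     remainder = n % bins
--
--     bins_ranges = []
--     hist_data = []
--     start = 0
--     for i in range(bins):
--         if i == bins - 1:
--             end = n
--         else:
--             end = start + bin_size
--             if i >= bins - remainder:
--                 end += 1
--
--         bins_ranges.append(sorted_data[start])
--         hist_data.append(end - start)
--
--         if i == bins - 1:
--             bins_ranges.append(sorted_data[end - 1])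
--
--         start = end
--
--     return hist_data, bins_ranges
-- ===== SOURCE B (Python) =====
-- def equidepth_histogram(data, bins):
--     sorted_data = sorted(data)
--     n = len(data)
--     q, r = n // bins, n % bins
--     counts = [q + (1 if i >= bins - r else 0) for i in range(bins)]
--     boundaries = [sorted_data[i * q + max(0, i - (bins - r))] for i in range(bins)]
--     if bins > 0:
--         boundaries.append(sorted_data[n - 1])
--     return counts, boundaries
-- ===== Notes on version B (the rewrite author's own statement) =====
-- stated objective: alternative
-- what changed: B replaces A's running start accumulator and last-bin special case with closed-form per-bin counts (q plus 1 for the last remainder bins) and a closed-form start index i*q + max(0, i-(bins-r)) for each boundary, appending the final boundary once after the loop.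
import Mathlib
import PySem

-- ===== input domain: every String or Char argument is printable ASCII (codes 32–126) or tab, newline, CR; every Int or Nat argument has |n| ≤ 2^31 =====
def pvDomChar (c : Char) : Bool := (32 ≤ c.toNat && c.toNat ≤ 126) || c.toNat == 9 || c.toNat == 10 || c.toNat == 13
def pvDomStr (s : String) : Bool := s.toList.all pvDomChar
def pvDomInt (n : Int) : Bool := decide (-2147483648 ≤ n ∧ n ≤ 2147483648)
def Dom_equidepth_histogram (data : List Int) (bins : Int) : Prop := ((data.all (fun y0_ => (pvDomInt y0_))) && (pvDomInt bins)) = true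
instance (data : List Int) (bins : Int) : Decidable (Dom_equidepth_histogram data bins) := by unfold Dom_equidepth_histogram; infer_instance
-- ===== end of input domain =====

-- B replaces A's running `start` accumulator and last-bin special case by closed-form
-- per-bin counts and start indices (alternative decomposition, same cost).

-- ===== PORT A =====
-- one loop iteration of A: state = (bins_ranges, hist_data, start)
def ehStepA (sorted_data : List Int) (n bins bin_size remainder : Int)
    (st : List Int × List Int × Int) (i : Int) : List Int × List Int × Int :=
  let ranges := st.1
  let hist := st.2.1
  let start := st.2.2
  let e :=
    if i = bins - 1 then n
    else
      let e0 := start + bin_size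
      if bins - remainder ≤ i then e0 + 1 else e0
  let ranges := ranges ++ [PySem.List.pyGetD sorted_data start 0]
  let hist := hist ++ [e - start]
  let ranges := if i = bins - 1 then ranges ++ [PySem.List.pyGetD sorted_data (e - 1) 0] else ranges
  (ranges, hist, e)

def equidepth_histogram (data : List Int) (bins : Int) : List Int × List Int :=
  let sorted_data := PySem.List.sorted data (fun x => x)
  let n : Int := (data.length : Int)
  let bin_size := PySem.Int.floordiv n bins
  let remainder := PySem.Int.mod n bins
  let st := (PySem.List.pyRange 0 bins 1).foldl (ehStepA sorted_data n bins bin_size remainder) ([], [], 0)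
  (st.2.1, st.1)

-- ===== PORT B =====
def equidepth_histogram_alt (data : List Int) (bins : Int) : List Int × List Int :=
  let sorted_data := PySem.List.sorted data (fun x => x)
  let n : Int := (data.length : Int)
  let q := PySem.Int.floordiv n bins
  let r := PySem.Int.mod n bins
  let counts := (PySem.List.pyRange 0 bins 1).map (fun i => q + if bins - r ≤ i then 1 else 0)
  let boundaries := (PySem.List.pyRange 0 bins 1).map
    (fun i => PySem.List.pyGetD sorted_data (i * q + max 0 (i - (bins - r))) 0)
  let boundaries := if 0 < bins then boundaries ++ [PySem.List.pyGetD sorted_data (n - 1) 0] else boundaries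
  (counts, boundaries)

-- ===== PRECONDITION & SPEC =====
-- Pre_ excludes exactly the inputs where the Python A raises: bins = 0 (ZeroDivisionError
-- at n // bins) and empty data with bins > 0 (IndexError at sorted_data[start]).
def Pre_equidepth_histogram (data : List Int) (bins : Int) : Prop :=
  bins ≠ 0 ∧ (0 < bins → data ≠ [])
instance (data : List Int) (bins : Int) : Decidable (Pre_equidepth_histogram data bins) := by
  unfold Pre_equidepth_histogram; infer_instance

def pvWitness_equidepth_histogram : List Int × Int := ([3, 1, 4, 1, 5], 2)

def Spec_equidepth_histogram (data : List Int) (bins : Int) (out : List Int × List Int) : Prop := out = equidepth_histogram_alt data bins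
instance (data : List Int) (bins : Int) (out : List Int × List Int) : Decidable (Spec_equidepth_histogram data bins out) := by unfold Spec_equidepth_histogram; infer_instance

-- ===== CLAIM (what is proved, stated in full; the proofs are below) =====
def Claim_equal_equidepth_histogram : Prop := ∀ (data : List Int) (bins : Int), Dom_equidepth_histogram data bins → Pre_equidepth_histogram data bins → Spec_equidepth_histogram data bins (equidepth_histogram data bins)

-- ===== LEMMAS AND PROOFS =====

-- closed-form start index of bin i (B's formula)
def ehStart (bins r q i : Int) : Int := i * q + max 0 (i - (bins - r))

-- invariant: after the loop has processed i = 0 .. m-1 (all non-last bins),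
-- A's state is B's maps plus the closed-form start
theorem ehStepA_inv (s : List Int) (n bins q r : Int) (hr : 0 ≤ r ∧ r < bins)
    (m : Nat) (hm : (m : Int) ≤ bins - 1) :
    (PySem.List.pyRange 0 (m : Int) 1).foldl (ehStepA s n bins q r) ([], [], 0) =
      ((PySem.List.pyRange 0 (m : Int) 1).map
          (fun i => PySem.List.pyGetD s (ehStart bins r q i) 0),
        (PySem.List.pyRange 0 (m : Int) 1).map (fun i => q + if bins - r ≤ i then 1 else 0),
        ehStart bins r q m) := by
  induction m with
  | zero =>
      simp [PySem.List.pyRange_one_eq_nil (by omega : (0:Int) ≤ 0), ehStart]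
      omega
  | succ k ih =>
      have hk : (k : Int) ≤ bins - 1 := by push_cast at hm ⊢; omega
      have hsplit : PySem.List.pyRange 0 ((k : Int) + 1) 1 =
          PySem.List.pyRange 0 (k : Int) 1 ++ [(k : Int)] :=
        PySem.List.pyRange_one_succ_right (by omega)
      have : ((k + 1 : Nat) : Int) = (k : Int) + 1 := by push_cast; ring
      rw [this, hsplit, List.foldl_append, List.map_append, ih hk]
      simp only [List.foldl_cons, List.foldl_nil, ehStepA]
      have hne : ¬ ((k : Int) = bins - 1) := by push_cast at hm; omega
      simp only [hne, if_false, List.map_cons, List.map_nil]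
      have hqd : ((k:Int)+1)*q = (k:Int)*q + q := by ring
      by_cases h : bins - r ≤ (k : Int) <;>
        simp [ehStart, h, Prod.ext_iff] <;> omega

-- ===== VERDICT (by name: the statement is the Claim_ definition above) =====
theorem equidepth_histogram_spec : Claim_equal_equidepth_histogram := by
  unfold Claim_equal_equidepth_histogram
  intro data bins _ hpre
  unfold Spec_equidepth_histogram equidepth_histogram equidepth_histogram_alt
  dsimp only
  rcases hpre with ⟨hb0, _⟩
  by_cases hpos : 0 < bins
  · set s := PySem.List.sorted data (fun x => x) with hs
    set n : Int := (data.length : Int) with hn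
    set q := PySem.Int.floordiv n bins with hq
    set r := PySem.Int.mod n bins with hrdef
    have hmodid : q * bins + r = n := PySem.Int.floordiv_mul_add_mod n bins
    have hrval : 0 ≤ r ∧ r < bins := by
      rw [hrdef, PySem.Int.mod_eq_emod_of_pos hpos]
      exact ⟨Int.emod_nonneg n (by omega), Int.emod_lt_of_pos n hpos⟩
    have hsplit : PySem.List.pyRange 0 bins 1 =
        PySem.List.pyRange 0 (bins - 1) 1 ++ [bins - 1] := by
      have := PySem.List.pyRange_one_succ_right (a := 0) (b := bins - 1) (by omega)
      simpa using this
    have hmk : (((bins - 1).toNat : Int)) = bins - 1 := by omega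
    have hinv := ehStepA_inv s n bins q r hrval (bins - 1).toNat (by omega)
    rw [hmk] at hinv
    rw [hsplit, List.foldl_append, hinv]
    simp only [List.foldl_cons, List.foldl_nil, ehStepA, if_pos hpos,
      List.map_append, List.map_cons, List.map_nil]
    have hcnt : n - ehStart bins r q (bins - 1) =
        q + if bins - r ≤ bins - 1 then 1 else 0 := by
      unfold ehStart
      split_ifs with h
      · have h1 : max 0 ((bins - 1) - (bins - r)) = r - 1 := by omega
        rw [h1]; nlinarith [hmodid]
      · have hr0 : r = 0 := by omega
        have h1 : max 0 ((bins - 1) - (bins - r)) = 0 := by omega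
        rw [h1]; nlinarith [hmodid]
    refine Prod.ext ?_ ?_
    · simpa using hcnt
    · simp [ehStart]
  · -- bins < 0 here (bins = 0 is excluded by Pre_): the range is empty on both sides
    rw [PySem.List.pyRange_one_eq_nil (by omega : bins ≤ 0)]
    simp [hpos]
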